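-- pv_equiv track=rewrite | github.com/ecly/kattis | emptyingbaltic/emptyingbaltic.py | solve
-- ===== SOURCE A (Python) =====
-- import heapq
-- from itertools import product
--
-- def solve(grid, drain_coords):
--     seen = {drain_coords}
--     drain_level = grid[drain_coords]
--     heap = [(drain_level, drain_coords)]
--     flow = 0
--     while heap:
--         level, (row, col) = heapq.heappop(heap)
--         flow += abs(level)
--         for d_row, d_col in product([-1, 0, 1], [-1, 0, 1]):
--             n_coords = row + d_row, col + d_col
--             n_level = grid.get(n_coords, 0)
--
--             if (n_level >= 0) or n_coords in seen:
--                 continue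
--
--             seen.add(n_coords)
--             heapq.heappush(heap, (max(level, n_level), n_coords))
--
--     return flow
-- ===== SOURCE B (Python) =====
-- def solve(grid, drain_coords):
--     # Array-Dijkstra without a heap: a tentative-level dict 'level', selection by
--     # linear min-scan, and neighbour discovery by scanning the grid itself with a
--     # Chebyshev-distance test instead of enumerating 3x3 offsets.
--     level = {drain_coords: grid[drain_coords]}
--     done = set()
--     flow = 0
--     while level:
--         cell = min(level, key=lambda c: (level[c], c))
--         lv = level.pop(cell)
--         done.add(cell)
--         flow += abs(lv)
--         row, col = cell
--         adds = {n: max(lv, h) for n, h in grid.items()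
--                 if h < 0 and abs(n[0] - row) <= 1 and abs(n[1] - col) <= 1
--                 and n not in done and n not in level}
--         level.update(adds)
--     return flow
-- ===== Notes on version B (the rewrite author's own statement) =====
-- stated objective: alternative
-- what changed: Replaces A's heapq priority queue + seen set + itertools 3x3 offset enumeration with a heap-free array-Dijkstra: a tentative-level dict selected by linear min-scan, a done set, and neighbour discovery by scanning the whole grid with a Chebyshev-distance test instead of probing the 9 offsets.
import Mathlib
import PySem

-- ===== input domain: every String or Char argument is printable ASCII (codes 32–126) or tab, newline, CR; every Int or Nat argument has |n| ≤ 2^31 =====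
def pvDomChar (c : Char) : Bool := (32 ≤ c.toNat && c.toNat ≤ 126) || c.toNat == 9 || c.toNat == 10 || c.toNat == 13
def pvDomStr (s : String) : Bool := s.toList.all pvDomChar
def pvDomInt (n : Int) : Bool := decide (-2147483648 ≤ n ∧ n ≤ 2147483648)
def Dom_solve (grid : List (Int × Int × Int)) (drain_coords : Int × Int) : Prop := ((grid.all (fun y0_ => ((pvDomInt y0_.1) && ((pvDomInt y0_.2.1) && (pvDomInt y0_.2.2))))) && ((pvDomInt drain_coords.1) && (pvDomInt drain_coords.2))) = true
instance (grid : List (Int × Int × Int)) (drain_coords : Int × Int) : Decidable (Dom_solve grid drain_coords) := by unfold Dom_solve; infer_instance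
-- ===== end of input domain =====

-- B replaces A's heapq priority queue + seen set + 3x3 offset enumeration by a heap-free
-- array-Dijkstra: a tentative-level table, selection by linear min-scan, and neighbour
-- discovery by scanning the grid with a Chebyshev-distance test (alternative, not faster).

-- ===== PORT A =====
-- the Python dict {(r,c): v}, passed here as the (r, c, v) association list, rebuilt once
def pvGridDict (grid : List (Int × Int × Int)) : PySem.Dict (Int × Int) Int :=
  PySem.Dict.ofList (grid.map (fun t => ((t.1, t.2.1), t.2.2)))

-- Python's tuple order (level, (row, col)) ≤ (level', (row', col'))
def pvHeapLe (a b : Int × Int × Int) : Bool :=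
  decide (a.1 < b.1 ∨ (a.1 = b.1 ∧ (a.2.1 < b.2.1 ∨ (a.2.1 = b.2.1 ∧ a.2.2 ≤ b.2.2))))

-- heapq ported as a sorted list (push = ordered insert, pop = head): exact here because
-- the seen-guard keeps all heap coordinates distinct, so heap keys are totally ordered
-- and heappop returns the unique minimum.
def pvHeapPush (e : Int × Int × Int) : List (Int × Int × Int) → List (Int × Int × Int)
  | [] => [e]
  | x :: t => if pvHeapLe e x then e :: x :: t else x :: pvHeapPush e t

-- product([-1, 0, 1], [-1, 0, 1]) in itertools order
def pvOffsetsA : List (Int × Int) :=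
  [(-1,-1),(-1,0),(-1,1),(0,-1),(0,0),(0,1),(1,-1),(1,0),(1,1)]

-- the body of A's inner for-loop
def pvStepA (g : PySem.Dict (Int × Int) Int) (level row col : Int)
    (st : List (Int × Int × Int) × PySem.Set (Int × Int)) (d : Int × Int) :
    List (Int × Int × Int) × PySem.Set (Int × Int) :=
  let n : Int × Int := (row + d.1, col + d.2)
  let nl : Int := g.getD n 0
  if 0 ≤ nl ∨ n ∈ st.2 then st
  else (pvHeapPush (max level nl, n) st.1, PySem.Set.add st.2 n)

-- A's while-loop; fuel is only a totality guard (grid.length + 2 always suffices: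
-- each iteration pops one entry and every pushed coordinate is a distinct grid key)
def pvLoopA (g : PySem.Dict (Int × Int) Int) :
    Nat → List (Int × Int × Int) → PySem.Set (Int × Int) → Int → Int
  | 0, _, _, flow => flow
  | _ + 1, [], _, flow => flow
  | fuel + 1, e :: rest, seen, flow =>
      let st := pvOffsetsA.foldl (pvStepA g e.1 e.2.1 e.2.2) (rest, seen)
      pvLoopA g fuel st.1 st.2 (flow + |e.1|)

def solve (grid : List (Int × Int × Int)) (drain_coords : Int × Int) : Int :=
  let g := pvGridDict grid
  match g.get? drain_coords with
  | none => 0  -- Python raises KeyError here; excluded by Pre_solve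
  | some dl =>
      pvLoopA g (grid.length + 2) [(dl, drain_coords)] (PySem.Set.ofList [drain_coords]) 0

-- ===== PORT B =====
-- Python's key (level[c], c): strict lexicographic comparison used by min()
def pvBLt (a b : (Int × Int) × Int) : Bool :=
  decide (a.2 < b.2 ∨ (a.2 = b.2 ∧ (a.1.1 < b.1.1 ∨ (a.1.1 = b.1.1 ∧ a.1.2 < b.1.2))))

-- min(level, key=...): left-to-right scan keeping the first minimal entry
def pvPickMin (m : (Int × Int) × Int) : List ((Int × Int) × Int) → (Int × Int) × Int
  | [] => m
  | x :: t => pvPickMin (if pvBLt x m then x else m) t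

-- Source B's dict comprehension 'adds': grid cells with negative height, Chebyshev-adjacent
-- to (row, col), neither finished nor already tentative, valued max(lv, h)
def pvAdds (items : List ((Int × Int) × Int)) (lv row col : Int)
    (done : PySem.Set (Int × Int)) (fr : List ((Int × Int) × Int)) :
    List ((Int × Int) × Int) :=
  (items.filter (fun p =>
      decide (p.2 < 0) && decide (|p.1.1 - row| ≤ 1) && decide (|p.1.2 - col| ≤ 1) &&
      !(PySem.Set.contains done p.1) && !(fr.any (fun q => q.1 == p.1)))).map
    (fun p => (p.1, max lv p.2))

-- B's while-loop over the tentative-level table 'fr'; same totality fuel as A's port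
def pvLoopB (g : PySem.Dict (Int × Int) Int) :
    Nat → List ((Int × Int) × Int) → PySem.Set (Int × Int) → Int → Int
  | 0, _, _, flow => flow
  | _ + 1, [], _, flow => flow
  | fuel + 1, it :: rest, done, flow =>
      let m := pvPickMin it rest
      let fr' := (it :: rest).filter (fun q => !(q.1 == m.1))
      let done' := PySem.Set.add done m.1
      pvLoopB g fuel (fr' ++ pvAdds g.items m.2 m.1.1 m.1.2 done' fr') done' (flow + |m.2|)

def solve_alt (grid : List (Int × Int × Int)) (drain_coords : Int × Int) : Int :=
  let g := pvGridDict grid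
  match g.get? drain_coords with
  | none => 0  -- Python raises KeyError here; excluded by Pre_solve
  | some dl =>
      pvLoopB g (grid.length + 2) [(drain_coords, dl)] PySem.Set.empty 0

-- ===== PRECONDITION & SPEC =====
-- Pre_solve excludes exactly the inputs where drain_coords is not a key of the grid dict:
-- there Python's grid[drain_coords] raises KeyError (in A and in B alike).
def Pre_solve (grid : List (Int × Int × Int)) (drain_coords : Int × Int) : Prop :=
  drain_coords ∈ grid.map (fun t => (t.1, t.2.1))
instance (grid : List (Int × Int × Int)) (drain_coords : Int × Int) : Decidable (Pre_solve grid drain_coords) := by unfold Pre_solve; infer_instance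

def pvWitness_solve : (List (Int × Int × Int)) × (Int × Int) := ([(0, 0, -1)], (0, 0))

def Spec_solve (grid : List (Int × Int × Int)) (drain_coords : Int × Int) (out : Int) : Prop := out = solve_alt grid drain_coords
instance (grid : List (Int × Int × Int)) (drain_coords : Int × Int) (out : Int) : Decidable (Spec_solve grid drain_coords out) := by unfold Spec_solve; infer_instance

-- ===== CLAIM (what is proved, stated in full; the proofs are below) =====
def Claim_equal_solve : Prop := ∀ (grid : List (Int × Int × Int)) (drain_coords : Int × Int), Dom_solve grid drain_coords → Pre_solve grid drain_coords → Spec_solve grid drain_coords (solve grid drain_coords)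

-- ===== LEMMAS AND PROOFS =====

-- order facts
lemma pvHeapLe_refl (a : Int × Int × Int) : pvHeapLe a a = true := by
  simp [pvHeapLe]

lemma pvHeapLe_total (a b : Int × Int × Int) (h : pvHeapLe a b = false) : pvHeapLe b a = true := by
  simp [pvHeapLe] at *; omega

lemma pvHeapLe_trans (a b c : Int × Int × Int) (h1 : pvHeapLe a b = true)
    (h2 : pvHeapLe b c = true) : pvHeapLe a c = true := by
  simp [pvHeapLe] at *; omega

lemma pvEntry_eq (a : Int × Int × Int) (b : (Int × Int) × Int)
    (h1 : pvHeapLe a (b.2, b.1) = true) (h2 : pvBLt (a.2, a.1) b = false) :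
    b = (a.2, a.1) := by
  obtain ⟨la, ra, ca⟩ := a; obtain ⟨⟨rb, cb⟩, lb⟩ := b
  simp [pvHeapLe, pvBLt, Prod.ext_iff] at *
  omega

lemma pvBLt_irrefl (a : (Int × Int) × Int) : pvBLt a a = false := by
  simp [pvBLt]

lemma pvBLt_trans (a b c : (Int × Int) × Int) (h1 : pvBLt a b = true)
    (h2 : pvBLt b c = true) : pvBLt a c = true := by
  simp [pvBLt] at *; omega

lemma pvBLt_le_lt (a b c : (Int × Int) × Int) (h1 : pvBLt a b = false)
    (h2 : pvBLt a c = true) : pvBLt b c = true := by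
  simp [pvBLt] at *; omega

-- pick-min facts
lemma pvPickMin_mem (m : (Int × Int) × Int) (l : List ((Int × Int) × Int)) :
    pvPickMin m l ∈ m :: l := by
  induction l generalizing m with
  | nil => simp [pvPickMin]
  | cons x t ih =>
    simp only [pvPickMin]
    have h := ih (if pvBLt x m then x else m)
    rcases List.mem_cons.mp h with h' | h'
    · rw [h']
      split_ifs <;> simp
    · simp [h']

lemma pvPickMin_isMin (m : (Int × Int) × Int) (l : List ((Int × Int) × Int)) :
    ∀ y ∈ m :: l, pvBLt y (pvPickMin m l) = false := by
  induction l generalizing m with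
  | nil =>
    intro y hy
    rw [List.mem_singleton.mp hy]
    simp [pvPickMin, pvBLt_irrefl]
  | cons x t ih =>
    intro y hy
    simp only [pvPickMin]
    have ih' := ih (if pvBLt x m then x else m)
    rcases List.mem_cons.mp hy with rfl | hy'
    · by_cases hxm : pvBLt x y = true
      · rw [if_pos hxm] at ih' ⊢
        by_contra hc
        have hc' : pvBLt y (pvPickMin x t) = true := by
          revert hc; cases h : pvBLt y (pvPickMin x t) <;> simp
        have h2 := pvBLt_trans x y _ hxm hc'
        have hx := ih' x (List.mem_cons_self ..)
        rw [h2] at hx; cases hx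
      · rw [if_neg hxm] at ih' ⊢
        exact ih' y (List.mem_cons_self ..)
    · rcases List.mem_cons.mp hy' with rfl | hyt
      · by_cases hxm : pvBLt y m = true
        · rw [if_pos hxm] at ih' ⊢
          exact ih' y (List.mem_cons_self ..)
        · rw [if_neg hxm] at ih' ⊢
          by_contra hc
          have hc' : pvBLt y (pvPickMin m t) = true := by
            revert hc; cases h : pvBLt y (pvPickMin m t) <;> simp
          have hxm' : pvBLt y m = false := by
            revert hxm; cases h : pvBLt y m <;> simp
          have h2 := pvBLt_le_lt y m _ hxm' hc'
          have hm := ih' m (List.mem_cons_self ..)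
          rw [h2] at hm; cases hm
      · split_ifs at ih' ⊢ <;> exact ih' y (List.mem_cons_of_mem _ hyt)

-- heap-push facts
lemma pvHeapPush_mem (e a : Int × Int × Int) (l : List (Int × Int × Int)) :
    a ∈ pvHeapPush e l ↔ a = e ∨ a ∈ l := by
  induction l with
  | nil => simp [pvHeapPush, eq_comm]
  | cons x t ih =>
    simp only [pvHeapPush]
    split_ifs with h
    · simp [eq_comm]
    · simp only [List.mem_cons, ih]; tauto

lemma pvHeapPush_perm (e : Int × Int × Int) (l : List (Int × Int × Int)) :
    List.Perm (pvHeapPush e l) (e :: l) := by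
  induction l with
  | nil => simp [pvHeapPush]
  | cons x t ih =>
    simp only [pvHeapPush]
    split_ifs with h
    · exact List.Perm.refl _
    · exact (List.Perm.cons x ih).trans (List.Perm.swap e x t)

lemma pvHeapPush_pairwise (e : Int × Int × Int) (l : List (Int × Int × Int))
    (h : l.Pairwise (fun a b => pvHeapLe a b = true)) :
    (pvHeapPush e l).Pairwise (fun a b => pvHeapLe a b = true) := by
  induction l with
  | nil => simp [pvHeapPush]
  | cons x t ih =>
    rcases List.pairwise_cons.mp h with ⟨hx, ht⟩
    simp only [pvHeapPush]
    split_ifs with he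
    · refine List.pairwise_cons.mpr ⟨?_, h⟩
      intro y hy
      rcases List.mem_cons.mp hy with rfl | hyt
      · exact he
      · exact pvHeapLe_trans e x y he (hx y hyt)
    · refine List.pairwise_cons.mpr ⟨?_, ih ht⟩
      intro y hy
      rcases (pvHeapPush_mem e y t).mp hy with rfl | hyt
      · exact pvHeapLe_total y x (by revert he; cases h2 : pvHeapLe y x <;> simp)
      · exact hx y hyt

-- the lockstep invariant between A's (heap, seen) and B's (frontier, done)
def pvInv (h : List (Int × Int × Int)) (s : PySem.Set (Int × Int))
    (fr : List ((Int × Int) × Int)) (done : PySem.Set (Int × Int)) : Prop :=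
  (∀ (l : Int) (rc : Int × Int), (l, rc) ∈ h ↔ (rc, l) ∈ fr) ∧
  (∀ x : Int × Int, x ∈ s ↔ (x ∈ done ∨ x ∈ fr.map Prod.fst)) ∧
  h.Pairwise (fun a b => pvHeapLe a b = true) ∧
  (h.map Prod.snd).Nodup ∧
  (fr.map Prod.fst).Nodup

-- offsets image is duplicate-free
lemma pvOffsetsImage_nodup (row col : Int) :
    (pvOffsetsA.map (fun d => (row + d.1, col + d.2))).Nodup := by
  apply List.Nodup.map
  · intro a b hab
    obtain ⟨a1, a2⟩ := a; obtain ⟨b1, b2⟩ := b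
    simp [Prod.ext_iff] at hab ⊢
    omega
  · decide

-- Chebyshev adjacency is exactly the 3x3 offset neighbourhood
lemma pvOffset_iff (row col : Int) (rc : Int × Int) :
    (∃ d ∈ pvOffsetsA, rc = (row + d.1, col + d.2)) ↔
      |rc.1 - row| ≤ 1 ∧ |rc.2 - col| ≤ 1 := by
  constructor
  · rintro ⟨d, hd, rfl⟩
    fin_cases hd <;> simp
  · rintro ⟨h1, h2⟩
    rw [abs_le] at h1 h2
    refine ⟨(rc.1 - row, rc.2 - col), ?_, by simp⟩
    simp [pvOffsetsA, Prod.ext_iff]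
    omega

-- characterization of A's 9-offset fold
lemma pvFoldA_spec (g : PySem.Dict (Int × Int) Int) (lv row col : Int) :
    ∀ (ds : List (Int × Int)) (hp : List (Int × Int × Int)) (sp : PySem.Set (Int × Int)),
    (ds.map (fun d => (row + d.1, col + d.2))).Nodup →
    (∀ rc ∈ hp.map Prod.snd, rc ∈ sp) →
    hp.Pairwise (fun a b => pvHeapLe a b = true) →
    (hp.map Prod.snd).Nodup →
    (∀ (l : Int) (rc : Int × Int),
        (l, rc) ∈ (ds.foldl (pvStepA g lv row col) (hp, sp)).1 ↔
        ((l, rc) ∈ hp ∨ ((∃ d ∈ ds, rc = (row + d.1, col + d.2)) ∧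
          g.getD rc 0 < 0 ∧ rc ∉ sp ∧ l = max lv (g.getD rc 0)))) ∧
    (∀ x : Int × Int,
        x ∈ (ds.foldl (pvStepA g lv row col) (hp, sp)).2 ↔
        (x ∈ sp ∨ ((∃ d ∈ ds, x = (row + d.1, col + d.2)) ∧
          g.getD x 0 < 0 ∧ x ∉ sp))) ∧
    (ds.foldl (pvStepA g lv row col) (hp, sp)).1.Pairwise (fun a b => pvHeapLe a b = true) ∧
    ((ds.foldl (pvStepA g lv row col) (hp, sp)).1.map Prod.snd).Nodup := by
  intro ds
  induction ds with
  | nil =>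
    intro hp sp _ hsub hpw hnd
    refine ⟨?_, ?_, hpw, hnd⟩
    · intro l rc; simp
    · intro x; simp
  | cons d ds ih =>
    intro hp sp hnodup hsub hpw hnd
    rw [List.map_cons, List.nodup_cons] at hnodup
    obtain ⟨hdn, hnodup'⟩ := hnodup
    rw [List.foldl_cons]
    by_cases hskip : 0 ≤ g.getD (row + d.1, col + d.2) 0 ∨ (row + d.1, col + d.2) ∈ sp
    · have hstep : pvStepA g lv row col (hp, sp) d = (hp, sp) := by
        simp only [pvStepA]
        rw [if_pos hskip]
      rw [hstep]
      obtain ⟨ih1, ih2, ih3, ih4⟩ := ih hp sp hnodup' hsub hpw hnd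
      refine ⟨?_, ?_, ih3, ih4⟩
      · intro l rc
        rw [ih1 l rc]
        constructor
        · rintro (h | ⟨⟨d', hd', rfl⟩, h2, h3, h4⟩)
          · exact Or.inl h
          · exact Or.inr ⟨⟨d', List.mem_cons_of_mem _ hd', rfl⟩, h2, h3, h4⟩
        · rintro (h | ⟨⟨d', hd', rfl⟩, h2, h3, h4⟩)
          · exact Or.inl h
          · rcases List.mem_cons.mp hd' with rfl | hd''
            · exact absurd hskip (by push Not; exact ⟨by omega, h3⟩)
            · exact Or.inr ⟨⟨d', hd'', rfl⟩, h2, h3, h4⟩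
      · intro x
        rw [ih2 x]
        constructor
        · rintro (h | ⟨⟨d', hd', rfl⟩, h2, h3⟩)
          · exact Or.inl h
          · exact Or.inr ⟨⟨d', List.mem_cons_of_mem _ hd', rfl⟩, h2, h3⟩
        · rintro (h | ⟨⟨d', hd', rfl⟩, h2, h3⟩)
          · exact Or.inl h
          · rcases List.mem_cons.mp hd' with rfl | hd''
            · exact absurd hskip (by push Not; exact ⟨by omega, h3⟩)
            · exact Or.inr ⟨⟨d', hd'', rfl⟩, h2, h3⟩
    · rw [not_or, not_le] at hskip
      obtain ⟨hneg, hnot⟩ := hskip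
      have hstep : pvStepA g lv row col (hp, sp) d =
          (pvHeapPush (max lv (g.getD (row + d.1, col + d.2) 0), (row + d.1, col + d.2)) hp,
            PySem.Set.add sp (row + d.1, col + d.2)) := by
        simp only [pvStepA]
        rw [if_neg (by rw [not_or, not_le]; exact ⟨hneg, hnot⟩)]
      rw [hstep]
      have hnmem : (row + d.1, col + d.2) ∉ hp.map Prod.snd := fun hmem => hnot (hsub _ hmem)
      have hsub' : ∀ rc ∈ (pvHeapPush (max lv (g.getD (row + d.1, col + d.2) 0),
          (row + d.1, col + d.2)) hp).map Prod.snd,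
          rc ∈ PySem.Set.add sp (row + d.1, col + d.2) := by
        intro rc hrc
        rcases List.mem_map.mp hrc with ⟨e', he', rfl⟩
        rcases (pvHeapPush_mem _ _ _).mp he' with rfl | he''
        · exact (PySem.Set.mem_add _ _ _).mpr (Or.inr rfl)
        · exact (PySem.Set.mem_add _ _ _).mpr
            (Or.inl (hsub _ (List.mem_map.mpr ⟨e', he'', rfl⟩)))
      have hpw' := pvHeapPush_pairwise (max lv (g.getD (row + d.1, col + d.2) 0),
        (row + d.1, col + d.2)) hp hpw
      have hnd' : ((pvHeapPush (max lv (g.getD (row + d.1, col + d.2) 0),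
          (row + d.1, col + d.2)) hp).map Prod.snd).Nodup := by
        rw [List.Perm.nodup_iff (List.Perm.map Prod.snd (pvHeapPush_perm _ _))]
        exact List.nodup_cons.mpr ⟨hnmem, hnd⟩
      obtain ⟨ih1, ih2, ih3, ih4⟩ := ih _ _ hnodup' hsub' hpw' hnd'
      refine ⟨?_, ?_, ih3, ih4⟩
      · intro l rc
        rw [ih1 l rc]
        constructor
        · rintro (h | ⟨⟨d', hd', rfl⟩, h2, h3, h4⟩)
          · rcases (pvHeapPush_mem _ _ _).mp h with heq | hhp
            · simp only [Prod.mk.injEq] at heq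
              obtain ⟨hl, hrc⟩ := heq
              subst hrc
              exact Or.inr ⟨⟨d, List.mem_cons_self .., rfl⟩, hneg, hnot, hl⟩
            · exact Or.inl hhp
          · rw [PySem.Set.mem_add] at h3
            push Not at h3
            exact Or.inr ⟨⟨d', List.mem_cons_of_mem _ hd', rfl⟩, h2, h3.1, h4⟩
        · rintro (h | ⟨⟨d', hd', rfl⟩, h2, h3, h4⟩)
          · exact Or.inl ((pvHeapPush_mem _ _ _).mpr (Or.inr h))
          · rcases List.mem_cons.mp hd' with rfl | hd''
            · refine Or.inl ((pvHeapPush_mem _ _ _).mpr (Or.inl ?_))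
              simp only [Prod.mk.injEq]
              exact ⟨h4, trivial⟩
            · have hne : (row + d'.1, col + d'.2) ≠ (row + d.1, col + d.2) := by
                intro heq
                exact hdn (heq ▸ List.mem_map.mpr ⟨d', hd'', rfl⟩)
              refine Or.inr ⟨⟨d', hd'', rfl⟩, h2, ?_, h4⟩
              rw [PySem.Set.mem_add]
              push Not
              exact ⟨h3, hne⟩
      · intro x
        rw [ih2 x]
        constructor
        · rintro (h | ⟨⟨d', hd', rfl⟩, h2, h3⟩)
          · rcases (PySem.Set.mem_add _ _ _).mp h with hx | rfl
            · exact Or.inl hx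
            · exact Or.inr ⟨⟨d, List.mem_cons_self .., rfl⟩, hneg, hnot⟩
          · rw [PySem.Set.mem_add] at h3
            push Not at h3
            exact Or.inr ⟨⟨d', List.mem_cons_of_mem _ hd', rfl⟩, h2, h3.1⟩
        · rintro (h | ⟨⟨d', hd', rfl⟩, h2, h3⟩)
          · exact Or.inl ((PySem.Set.mem_add _ _ _).mpr (Or.inl h))
          · rcases List.mem_cons.mp hd' with rfl | hd''
            · exact Or.inl ((PySem.Set.mem_add _ _ _).mpr (Or.inr rfl))
            · have hne : (row + d'.1, col + d'.2) ≠ (row + d.1, col + d.2) := by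
                intro heq
                exact hdn (heq ▸ List.mem_map.mpr ⟨d', hd'', rfl⟩)
              refine Or.inr ⟨⟨d', hd'', rfl⟩, h2, ?_⟩
              rw [PySem.Set.mem_add]
              push Not
              exact ⟨h3, hne⟩

-- membership in Source B's adds comprehension
lemma pvAdds_mem (items : List ((Int × Int) × Int)) (lv row col : Int)
    (done : PySem.Set (Int × Int)) (fr : List ((Int × Int) × Int))
    (rc : Int × Int) (l : Int) :
    (rc, l) ∈ pvAdds items lv row col done fr ↔
      ∃ v, (rc, v) ∈ items ∧ v < 0 ∧ |rc.1 - row| ≤ 1 ∧ |rc.2 - col| ≤ 1 ∧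
        rc ∉ done ∧ rc ∉ fr.map Prod.fst ∧ l = max lv v := by
  simp only [pvAdds, List.mem_map, List.mem_filter]
  constructor
  · rintro ⟨⟨prc, pv⟩, ⟨hmem, hpred⟩, heq⟩
    simp only [Bool.and_eq_true, decide_eq_true_eq, Bool.not_eq_true',
      PySem.Set.contains_eq_listContains, List.contains_eq_mem, decide_eq_false_iff_not,
      List.any_eq_false] at hpred
    obtain ⟨⟨⟨⟨hv, hr⟩, hc⟩, hd⟩, hf⟩ := hpred
    simp only [Prod.mk.injEq] at heq
    obtain ⟨rfl, rfl⟩ := heq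
    refine ⟨pv, hmem, hv, hr, hc, hd, ?_, rfl⟩
    rintro ⟨q, hq, hq1⟩
    exact (hf q hq) (beq_iff_eq.mpr hq1)
  · rintro ⟨v, hmem, hv, hr, hc, hd, hf, rfl⟩
    refine ⟨(rc, v), ⟨hmem, ?_⟩, rfl⟩
    simp only [Bool.and_eq_true, decide_eq_true_eq, Bool.not_eq_true',
      PySem.Set.contains_eq_listContains, List.contains_eq_mem, decide_eq_false_iff_not,
      List.any_eq_false]
    exact ⟨⟨⟨⟨hv, hr⟩, hc⟩, hd⟩,
      fun q hq hq1 => hf ⟨q, hq, beq_iff_eq.mp hq1⟩⟩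

-- the two loops agree step for step
lemma pvLoop_eq (g : PySem.Dict (Int × Int) Int) (hg : g.keys.Nodup) :
    ∀ (fuel : Nat) (h : List (Int × Int × Int)) (s : PySem.Set (Int × Int))
      (fr : List ((Int × Int) × Int)) (done : PySem.Set (Int × Int)) (flow : Int),
      pvInv h s fr done →
      pvLoopA g fuel h s flow = pvLoopB g fuel fr done flow := by
  intro fuel
  induction fuel with
  | zero => intro h s fr done flow _; rfl
  | succ fuel ih =>
    intro h s fr done flow hI
    obtain ⟨hM, hS, hP, hN, hK⟩ := hI
    cases h with
    | nil =>
      cases fr with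
      | nil => rfl
      | cons p ps =>
        exact absurd ((hM p.2 p.1).mpr (List.mem_cons_self ..)) (by simp)
    | cons e rest =>
      have hein : (e.2, e.1) ∈ fr := (hM e.1 e.2).mp (List.mem_cons_self ..)
      cases fr with
      | nil => simp at hein
      | cons it rest' =>
        have hmemM : pvPickMin it rest' ∈ it :: rest' := pvPickMin_mem it rest'
        have hheap : ((pvPickMin it rest').2, (pvPickMin it rest').1) ∈ e :: rest :=
          (hM (pvPickMin it rest').2 (pvPickMin it rest').1).mpr hmemM
        have hle : pvHeapLe e ((pvPickMin it rest').2, (pvPickMin it rest').1) = true := by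
          rcases List.mem_cons.mp hheap with hh | hh
          · rw [← hh]
            exact pvHeapLe_refl _
          · exact (List.pairwise_cons.mp hP).1 _ hh
        have hem : pvPickMin it rest' = (e.2, e.1) :=
          pvEntry_eq e _ hle (pvPickMin_isMin it rest' _ hein)
        simp only [pvLoopA, pvLoopB, hem]
        -- abbreviations for B's post-pop state
        have hkey1 : e.2 ∈ (it :: rest').map Prod.fst := List.mem_map.mpr ⟨(e.2, e.1), hein, rfl⟩
        have hkey2 : e.2 ∈ s := (hS e.2).mpr (Or.inr hkey1)
        have hNr : e.2 ∉ rest.map Prod.snd := (List.nodup_cons.mp hN).1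
        -- membership in the filtered frontier
        have hf3 : ∀ (rc : Int × Int) (l : Int),
            (rc, l) ∈ (it :: rest').filter (fun q => !(q.1 == e.2)) ↔
            ((rc, l) ∈ it :: rest' ∧ rc ≠ e.2) := by
          intro rc l
          simp [List.mem_filter]
        have hf4 : ∀ rc : Int × Int,
            rc ∈ ((it :: rest').filter (fun q => !(q.1 == e.2))).map Prod.fst ↔
            (rc ∈ (it :: rest').map Prod.fst ∧ rc ≠ e.2) := by
          intro rc
          constructor
          · rintro hmem
            rcases List.mem_map.mp hmem with ⟨q, hq, rfl⟩
            rw [List.mem_filter] at hq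
            refine ⟨List.mem_map.mpr ⟨q, hq.1, rfl⟩, by simpa using hq.2⟩
          · rintro ⟨hmem, hne⟩
            rcases List.mem_map.mp hmem with ⟨q, hq, rfl⟩
            exact List.mem_map.mpr ⟨q, List.mem_filter.mpr ⟨hq, by simpa using hne⟩, rfl⟩
        have hf5 : ∀ (l : Int) (rc : Int × Int),
            (l, rc) ∈ rest ↔ (rc, l) ∈ (it :: rest').filter (fun q => !(q.1 == e.2)) := by
          intro l rc
          rw [hf3]
          constructor
          · intro hmem
            refine ⟨(hM l rc).mp (List.mem_cons_of_mem _ hmem), ?_⟩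
            intro hrc
            exact hNr (hrc ▸ List.mem_map.mpr ⟨(l, rc), hmem, rfl⟩)
          · rintro ⟨hmem, hne⟩
            rcases List.mem_cons.mp ((hM l rc).mpr hmem) with hh | hh
            · exact (hne (congrArg Prod.snd hh)).elim
            · exact hh
        have hf6 : ∀ x : Int × Int, x ∈ s ↔
            (x ∈ PySem.Set.add done e.2 ∨
             x ∈ ((it :: rest').filter (fun q => !(q.1 == e.2))).map Prod.fst) := by
          intro x
          by_cases hx : x = e.2
          · subst hx
            constructor
            · intro _
              exact Or.inl ((PySem.Set.mem_add _ _ _).mpr (Or.inr rfl))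
            · intro _
              exact hkey2
          · rw [hS x, PySem.Set.mem_add, hf4]
            constructor
            · rintro (hd | hfr)
              · exact Or.inl (Or.inl hd)
              · exact Or.inr ⟨hfr, hx⟩
            · rintro ((hd | heq) | ⟨hfr, _⟩)
              · exact Or.inl hd
              · exact absurd heq hx
              · exact Or.inr hfr
        -- A's fold, characterized
        obtain ⟨hF1, hF2, hF3, hF4⟩ := pvFoldA_spec g e.1 e.2.1 e.2.2 pvOffsetsA rest s
          (pvOffsetsImage_nodup e.2.1 e.2.2)
          (fun rc hrc => by
            rcases List.mem_map.mp hrc with ⟨e', he', rfl⟩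
            exact (hS e'.2).mpr (Or.inr (List.mem_map.mpr
              ⟨(e'.2, e'.1), (hM e'.1 e'.2).mp (List.mem_cons_of_mem _ he'), rfl⟩)))
          (List.pairwise_cons.mp hP).2 (List.nodup_cons.mp hN).2
        -- the added-clause bridge between A's offset fold and Source B's comprehension
        have hC : ∀ (rc : Int × Int) (l : Int),
            ((∃ d ∈ pvOffsetsA, rc = (e.2.1 + d.1, e.2.2 + d.2)) ∧
              g.getD rc 0 < 0 ∧ rc ∉ s ∧ l = max e.1 (g.getD rc 0)) ↔
            (rc, l) ∈ pvAdds g.items e.1 e.2.1 e.2.2 (PySem.Set.add done e.2)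
              ((it :: rest').filter (fun q => !(q.1 == e.2))) := by
          intro rc l
          rw [pvAdds_mem]
          constructor
          · rintro ⟨hd, hneg, hns, rfl⟩
            obtain ⟨h1, h2⟩ := (pvOffset_iff e.2.1 e.2.2 rc).mp hd
            have hget : g.get? rc = some (g.getD rc 0) := by
              rw [PySem.Dict.getD_eq_get?_getD] at hneg ⊢
              cases hq : g.get? rc with
              | none => rw [hq] at hneg; simp at hneg
              | some v => simp
            refine ⟨g.getD rc 0, PySem.Dict.mem_items_of_get?_eq_some g hget, hneg, h1, h2,
              ?_, ?_, rfl⟩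
            · rw [PySem.Set.mem_add]
              push Not
              exact ⟨fun hc => hns ((hS rc).mpr (Or.inl hc)), fun hrc => hns (hrc ▸ hkey2)⟩
            · rw [hf4]
              push Not
              intro hc
              exact absurd ((hS rc).mpr (Or.inr hc)) hns
          · rintro ⟨v, hmem, hv, h1, h2, hnd', hnf, rfl⟩
            have hgd : g.getD rc 0 = v := PySem.Dict.getD_of_mem_items g hmem hg 0
            have hns : rc ∉ s := fun hc => ((hf6 rc).mp hc).elim hnd' hnf
            exact ⟨(pvOffset_iff e.2.1 e.2.2 rc).mpr ⟨h1, h2⟩, by rw [hgd]; exact hv, hns,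
              by rw [hgd]⟩
        refine ih _ _ _ _ _ ⟨?_, ?_, hF3, hF4, ?_⟩
        · intro l rc
          rw [hF1 l rc, List.mem_append, ← hf5 l rc, ← hC rc l]
        · intro x
          rw [hF2 x, List.map_append, List.mem_append]
          constructor
          · rintro (hx | ⟨hd, hneg, hns⟩)
            · rw [hf6 x] at hx
              tauto
            · refine Or.inr (Or.inr (List.mem_map.mpr ?_))
              refine ⟨(x, max e.1 (g.getD x 0)), (hC x _).mp ⟨hd, hneg, hns, rfl⟩, rfl⟩
          · rintro (hx | hx | hx)
            · exact Or.inl ((hf6 x).mpr (Or.inl hx))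
            · exact Or.inl ((hf6 x).mpr (Or.inr hx))
            · rcases List.mem_map.mp hx with ⟨q, hq, rfl⟩
              have := (hC q.1 q.2).mpr hq
              exact Or.inr ⟨this.1, this.2.1, this.2.2.1⟩
        · rw [List.map_append]
          apply List.Nodup.append
          · exact hK.sublist (List.Sublist.map Prod.fst List.filter_sublist)
          · have hmapeq : (pvAdds g.items e.1 e.2.1 e.2.2 (PySem.Set.add done e.2)
                ((it :: rest').filter (fun q => !(q.1 == e.2)))).map Prod.fst =
                ((g.items.filter (fun p =>
                  decide (p.2 < 0) && decide (|p.1.1 - e.2.1| ≤ 1) && decide (|p.1.2 - e.2.2| ≤ 1) &&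
                  !(PySem.Set.contains (PySem.Set.add done e.2) p.1) &&
                  !(((it :: rest').filter (fun q => !(q.1 == e.2))).any (fun q => q.1 == p.1)))).map Prod.fst) := by
              simp [pvAdds, List.map_map, Function.comp_def]
            rw [hmapeq]
            have : g.items.map Prod.fst = g.keys := rfl
            exact (this ▸ hg).sublist (List.Sublist.map Prod.fst List.filter_sublist)
          · rw [List.disjoint_left]
            intro x hx hx2
            rcases List.mem_map.mp hx2 with ⟨q, hq, rfl⟩
            have := (hC q.1 q.2).mpr hq
            exact (this.2.2.1) ((hS q.1).mpr (Or.inr ((hf4 q.1).mp hx).1))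

lemma pvSolve_eq (grid : List (Int × Int × Int)) (drain_coords : Int × Int) :
    solve grid drain_coords = solve_alt grid drain_coords := by
  simp only [solve, solve_alt]
  cases hg : (pvGridDict grid).get? drain_coords with
  | none => rfl
  | some dl =>
    apply pvLoop_eq
    · exact PySem.Dict.nodup_keys_ofList _
    · refine ⟨?_, ?_, ?_, ?_, ?_⟩
      · intro l rc
        simp [Prod.ext_iff, and_comm]
      · intro x
        simp [PySem.Set.ofList, PySem.Set.add, PySem.Set.empty]
      · simp
      · simp
      · simp

-- ===== VERDICT (by name: the statement is the Claim_ definition above) =====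
theorem solve_spec : Claim_equal_solve := by
  intro grid dc _ _
  unfold Spec_solve
  exact pvSolve_eq grid dc
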